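-- pv_equiv track=rewrite | github.com/princex2712/python | module_3_collections_functions_and_modules/q4.py | new_fun
-- ===== SOURCE A (Python) =====
-- def new_fun(in_list):
--     sum = 0
--     small_num = in_list[0]
--     large_num = in_list[0]
--
--     for i in in_list:
--         if i > large_num:
--             large_num = i
--         if i < small_num:
--             small_num = i
--         sum +=i
--
--     return sum,small_num,large_num
-- ===== SOURCE B (Python) =====
-- def new_fun(in_list):
--     return sum(in_list), min(in_list), max(in_list)
-- ===== Notes on version B (the rewrite author's own statement) =====
-- stated objective: idiomatic
-- what changed: Replaces the single accumulating loop tracking (sum, smallest, largest) with the three builtin aggregations sum/min/max.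
import Mathlib
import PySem

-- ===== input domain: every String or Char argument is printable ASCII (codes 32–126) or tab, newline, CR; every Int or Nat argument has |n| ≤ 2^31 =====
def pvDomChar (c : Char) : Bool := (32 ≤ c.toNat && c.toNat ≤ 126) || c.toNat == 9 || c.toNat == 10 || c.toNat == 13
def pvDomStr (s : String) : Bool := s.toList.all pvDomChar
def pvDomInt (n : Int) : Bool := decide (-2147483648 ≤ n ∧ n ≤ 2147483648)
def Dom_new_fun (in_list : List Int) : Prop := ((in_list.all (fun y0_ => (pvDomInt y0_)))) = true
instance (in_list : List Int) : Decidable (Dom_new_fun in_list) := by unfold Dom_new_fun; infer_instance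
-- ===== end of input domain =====

-- B replaces A's single accumulating loop with the three builtin aggregations sum/min/max (idiomatic; return value only).

-- ===== PORT A =====
-- loop body of A's for-loop over state (sum, small_num, large_num)
def newFunStep (st : Int × Int × Int) (i : Int) : Int × Int × Int :=
  let lg := if i > st.2.2 then i else st.2.2
  let sm := if i < st.2.1 then i else st.2.1
  (st.1 + i, sm, lg)

def new_fun (in_list : List Int) : Int × Int × Int :=
  -- in_list[0]: IndexError on the empty list, excluded by Pre_new_fun
  let first := (PySem.List.pyGet? in_list 0).getD 0
  in_list.foldl newFunStep (0, first, first)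

-- ===== PORT B =====
def new_fun_alt (in_list : List Int) : Int × Int × Int :=
  (in_list.sum,
   (PySem.List.min? in_list (fun x => x)).getD 0,   -- min([]) raises, excluded by Pre_new_fun
   (PySem.List.max? in_list (fun x => x)).getD 0)

-- ===== PRECONDITION & SPEC =====
-- A raises IndexError (in_list[0]) and B raises ValueError (min/max) on the empty list.
def Pre_new_fun (in_list : List Int) : Prop := in_list ≠ []
instance (in_list : List Int) : Decidable (Pre_new_fun in_list) := by unfold Pre_new_fun; infer_instance
def pvWitness_new_fun : List Int := [3, -2, 5]

def Spec_new_fun (in_list : List Int) (out : Int × Int × Int) : Prop := out = new_fun_alt in_list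
instance (in_list : List Int) (out : Int × Int × Int) : Decidable (Spec_new_fun in_list out) := by unfold Spec_new_fun; infer_instance

-- ===== CLAIM (what is proved, stated in full; the proofs are below) =====
def Claim_equal_new_fun : Prop := ∀ (in_list : List Int), Dom_new_fun in_list → Pre_new_fun in_list → Spec_new_fun in_list (new_fun in_list)

-- ===== LEMMAS AND PROOFS =====
lemma newFun_fold (t : List Int) : ∀ s sm lg : Int,
    t.foldl newFunStep (s, sm, lg) = (s + t.sum, t.foldl min sm, t.foldl max lg) := by
  induction t with
  | nil => intro s sm lg; simp
  | cons i t ih =>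
    intro s sm lg
    simp only [List.foldl_cons, List.sum_cons, newFunStep, ih]
    refine congrArg₂ Prod.mk (by ring) (congrArg₂ Prod.mk ?_ ?_) <;>
      · congr 1; omega

-- ===== VERDICT (by name: the statement is the Claim_ definition above) =====
theorem new_fun_spec : Claim_equal_new_fun := by
  intro in_list _ hpre
  unfold Spec_new_fun new_fun new_fun_alt
  match in_list, hpre with
  | x :: t, _ =>
    simp only [PySem.List.pyGet?, PySem.List.pyIdx?, PySem.List.max?_id_cons, PySem.List.min?_id_cons]
    rw [newFun_fold]
    simp
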